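-- pv_equiv track=rewrite | github.com/cirosantilli/project-euler-solvers | solvers/511.py | divisor_residue_counts
-- ===== SOURCE A (Python) =====
-- from typing import List, Tuple
--
-- def factorize(n: int) -> List[Tuple[int, int]]:
--     """Trial division factorization; fast enough for n <= ~1e12."""
--     fac: List[Tuple[int, int]] = []
--     cnt = 0
--     while n % 2 == 0:
--         n //= 2
--         cnt += 1
--     if cnt:
--         fac.append((2, cnt))
--
--     cnt = 0
--     while n % 3 == 0:
--         n //= 3
--         cnt += 1
--     if cnt:
--         fac.append((3, cnt))
--
--     f = 5
--     step = 2
--     while f * f <= n: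
--         cnt = 0
--         while n % f == 0:
--             n //= f
--             cnt += 1
--         if cnt:
--             fac.append((f, cnt))
--         f += step
--         step = 6 - step  # 2,4,2,4,... (checks 6k±1)
--     if n > 1:
--         fac.append((n, 1))
--     return fac
--
-- def divisor_residue_counts(n: int, k: int) -> List[int]:
--     """Return counts[r] = #{d | n : d mod k = r}."""
--     fac = factorize(n)
--     counts = [0] * k
--
--     def rec(i: int, cur: int) -> None:
--         if i == len(fac):
--             counts[cur % k] += 1
--             return
--         p, e = fac[i]
--         v = cur
--         for _ in range(e + 1):
--             rec(i + 1, v)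
--             v *= p
--
--     rec(0, 1)
--     return counts
-- ===== SOURCE B (Python) =====
-- def divisor_residue_counts(n: int, k: int) -> list:
--     """Return counts[r] = #{d | n : d mod k = r}.
--
--     Instead of building the factor list and recursively enumerating every
--     divisor, fold each prime power directly into a length-k residue-count
--     vector (a convolution in Z/k), fused with the trial division.
--     """
--     vec = [0] * k
--     vec[1 % k] = 1
--
--     def absorb(p: int, e: int) -> None:
--         nonlocal vec
--         new = [0] * k
--         q = 1
--         for _ in range(e + 1):
--             for r in range(k):
--                 new[(r * q) % k] += vec[r]
--             q *= p
--         vec = new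
--
--     m = n
--     cnt = 0
--     while m % 2 == 0:
--         m //= 2
--         cnt += 1
--     if cnt:
--         absorb(2, cnt)
--
--     cnt = 0
--     while m % 3 == 0:
--         m //= 3
--         cnt += 1
--     if cnt:
--         absorb(3, cnt)
--
--     f = 5
--     while f * f <= m:
--         cnt = 0
--         while m % f == 0:
--             m //= f
--             cnt += 1
--         if cnt:
--             absorb(f, cnt)
--         f += 2 if f % 3 == 2 else 4
--     if m > 1:
--         absorb(m, 1)
--     return vec
-- ===== Notes on version B (the rewrite author's own statement) =====
-- stated objective: alternative
-- what changed: B replaces A's factor-list construction plus recursive enumeration of all divisors (a tree of d(n) leaves) by a length-k residue-count vector that is updated by a Z/k convolution as each prime power is found during trial division, so no divisor list or recursion tree is ever built.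
import Mathlib
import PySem

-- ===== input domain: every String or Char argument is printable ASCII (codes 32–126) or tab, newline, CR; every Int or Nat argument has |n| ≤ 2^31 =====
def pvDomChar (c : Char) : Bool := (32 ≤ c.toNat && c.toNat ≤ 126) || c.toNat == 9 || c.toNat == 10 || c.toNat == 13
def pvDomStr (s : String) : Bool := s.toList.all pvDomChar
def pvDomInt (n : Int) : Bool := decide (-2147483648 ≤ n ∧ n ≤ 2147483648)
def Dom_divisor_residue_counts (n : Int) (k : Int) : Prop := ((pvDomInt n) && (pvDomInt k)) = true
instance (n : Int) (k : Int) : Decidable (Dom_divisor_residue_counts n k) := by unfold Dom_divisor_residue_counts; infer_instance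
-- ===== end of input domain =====

-- B replaces A's recursive divisor-tree enumeration by a residue-vector convolution folded into the
-- trial division (alternative algorithm, no divisor enumeration); equivalence is about return values only.

-- ===== PORT A =====
-- 'while m % p == 0: m //= p; cnt += 1' — this loop appears verbatim in both Pythons, shared helper.
-- fuel bounds the iterations (|m|+1 always suffices for m ≠ 0; Python diverges at m = 0, outside Pre_).
def pvStrip (p : Int) : Nat → Int → Int × Int
  | 0, m => (m, 0)
  | fuel+1, m =>
    if PySem.Int.mod m p == 0 then
      let r := pvStrip p fuel (PySem.Int.floordiv m p)
      (r.1, r.2 + 1)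
    else (m, 0)

-- A's wheel loop: f starts at 5, 'step' alternates 2,4 via step = 6 - step
def pvFacLoopA : Nat → Int → Int → Int → List (Int × Int) → Int × List (Int × Int)
  | 0, m, _, _, fac => (m, fac)
  | fuel+1, m, f, step, fac =>
    if f * f ≤ m then
      let s := pvStrip f (m.natAbs + 1) m
      pvFacLoopA fuel s.1 (f + step) (6 - step) (if s.2 ≠ 0 then fac ++ [(f, s.2)] else fac)
    else (m, fac)

def pvFactorizeA (n : Int) : List (Int × Int) :=
  let s2 := pvStrip 2 (n.natAbs + 1) n
  let fac2 := if s2.2 ≠ 0 then [((2:Int), s2.2)] else []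
  let s3 := pvStrip 3 (s2.1.natAbs + 1) s2.1
  let fac3 := if s3.2 ≠ 0 then fac2 ++ [((3:Int), s3.2)] else fac2
  let r := pvFacLoopA (s3.1.natAbs + 1) s3.1 5 2 fac3
  if 1 < r.1 then r.2 ++ [(r.1, 1)] else r.2

-- A's 'rec(i, cur)' with the mutated counts list threaded as state;
-- 'for _ in range(e+1): rec(i+1, v); v *= p' is the foldl
def pvRecA (k : Int) : List (Int × Int) → Int → List Int → List Int
  | [], cur, counts =>
      PySem.List.pySetD counts (PySem.Int.mod cur k)
        (PySem.List.pyGetD counts (PySem.Int.mod cur k) 0 + 1)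
  | (p, _e) :: rest, cur, counts =>
      ((PySem.List.pyRange 0 (_e + 1) 1).foldl
        (fun (s : Int × List Int) _ => (s.1 * p, pvRecA k rest s.1 s.2))
        (cur, counts)).2
  termination_by l => l.length

def divisor_residue_counts (n : Int) (k : Int) : List Int :=
  pvRecA k (pvFactorizeA n) 1 (PySem.List.pyRepeat [(0:Int)] k)

-- ===== PORT B =====
-- B's absorb(p, e): fold the prime power into the residue-count vector
-- (state: (new, q); 'for _ in range(e+1): for r in range(k): new[(r*q)%k] += vec[r]; q *= p')
def pvAbsorb (k p e : Int) (vec : List Int) : List Int :=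
  ((PySem.List.pyRange 0 (e + 1) 1).foldl
    (fun (s : List Int × Int) _ =>
      ((PySem.List.pyRange 0 k 1).foldl
        (fun (new : List Int) r =>
          PySem.List.pySetD new (PySem.Int.mod (r * s.2) k)
            (PySem.List.pyGetD new (PySem.Int.mod (r * s.2) k) 0 + PySem.List.pyGetD vec r 0))
        s.1,
       s.2 * p))
    (PySem.List.pyRepeat [(0:Int)] k, 1)).1

-- B's wheel loop: 'f += 2 if f % 3 == 2 else 4', absorbing in place of appending
def pvLoopB (k : Int) : Nat → Int → Int → List Int → Int × List Int
  | 0, m, _, vec => (m, vec)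
  | fuel+1, m, f, vec =>
    if f * f ≤ m then
      let s := pvStrip f (m.natAbs + 1) m
      pvLoopB k fuel s.1 (f + if PySem.Int.mod f 3 == 2 then 2 else 4)
        (if s.2 ≠ 0 then pvAbsorb k f s.2 vec else vec)
    else (m, vec)

def divisor_residue_counts_alt (n : Int) (k : Int) : List Int :=
  let vec0 := PySem.List.pySetD (PySem.List.pyRepeat [(0:Int)] k) (PySem.Int.mod 1 k) 1
  let s2 := pvStrip 2 (n.natAbs + 1) n
  let v2 := if s2.2 ≠ 0 then pvAbsorb k 2 s2.2 vec0 else vec0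
  let s3 := pvStrip 3 (s2.1.natAbs + 1) s2.1
  let v3 := if s3.2 ≠ 0 then pvAbsorb k 3 s3.2 v2 else v2
  let r := pvLoopB k (s3.1.natAbs + 1) s3.1 5 v3
  if 1 < r.1 then pvAbsorb k r.1 1 r.2 else r.2

-- ===== PRECONDITION & SPEC =====
-- Pre_ excludes k ≤ 0, where A raises (ZeroDivisionError / IndexError on 'counts[cur % k]'),
-- and n = 0, where A's first while-loop never terminates.
def Pre_divisor_residue_counts (n : Int) (k : Int) : Prop := n ≠ 0 ∧ 1 ≤ k
instance (n : Int) (k : Int) : Decidable (Pre_divisor_residue_counts n k) := by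
  unfold Pre_divisor_residue_counts; infer_instance

def pvWitness_divisor_residue_counts : Int × Int := (12, 4)

def Spec_divisor_residue_counts (n : Int) (k : Int) (out : List Int) : Prop := out = divisor_residue_counts_alt n k
instance (n : Int) (k : Int) (out : List Int) : Decidable (Spec_divisor_residue_counts n k out) := by unfold Spec_divisor_residue_counts; infer_instance

-- ===== CLAIM (what is proved, stated in full; the proofs are below) =====
def Claim_equal_divisor_residue_counts : Prop := ∀ (n : Int) (k : Int), Dom_divisor_residue_counts n k → Pre_divisor_residue_counts n k → Spec_divisor_residue_counts n k (divisor_residue_counts n k)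

-- ===== LEMMAS AND PROOFS =====

-- semantic middleman: pvCnt k L c r = number of leaves of A's recursion tree over L started at c
-- whose residue mod k is r; pvPows c p m = [c, c*p, ..., c*p^(m-1)]
def pvPows : Int → Int → Nat → List Int
  | _, _, 0 => []
  | c, p, m+1 => c :: pvPows (c * p) p m

def pvCnt (k : Int) : List (Int × Int) → Int → Int → Int
  | [], c, r => if PySem.Int.mod c k = r then 1 else 0
  | (p, e) :: t, c, r =>
      ((pvPows c p (PySem.List.pyRange 0 (e + 1) 1).length).map (fun v => pvCnt k t v r)).sum
  termination_by l => l.length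

def pvAbsorbList (k : Int) (L : List (Int × Int)) (vec : List Int) : List Int :=
  L.foldl (fun v pe => pvAbsorb k pe.1 pe.2 v) vec

lemma pvPows_eq (p : Int) : ∀ (m : Nat) (c : Int), pvPows c p m = (List.range m).map (fun j => c * p ^ j) := by
  intro m
  induction m with
  | zero => intro c; simp [pvPows]
  | succ m ih =>
    intro c
    rw [List.range_succ_eq_map]
    simp only [pvPows, List.map_cons, List.map_map, pow_zero, mul_one, ih]
    congr 1
    apply List.map_congr_left
    intro j _
    simp [Function.comp, pow_succ]
    ring

lemma pvCnt_congr {k : Int} (hk : 0 < k) :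
    ∀ (L : List (Int × Int)) (c c' r : Int), c % k = c' % k →
      pvCnt k L c r = pvCnt k L c' r := by
  intro L
  induction L with
  | nil =>
    intro c c' r h
    simp only [pvCnt, PySem.Int.mod_eq_emod_of_pos hk, h]
  | cons pe t ih =>
    obtain ⟨p, e⟩ := pe
    intro c c' r h
    simp only [pvCnt, pvPows_eq, List.map_map]
    congr 1
    apply List.map_congr_left
    intro j _
    simp only [Function.comp]
    exact ih _ _ r (by rw [Int.mul_emod, h, ← Int.mul_emod])


lemma getD_set_eq (xs : List Int) (i s : Nat) (v : Int) (hi : i < xs.length) :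
    (xs.set i v).getD s 0 = if s = i then v else xs.getD s 0 := by
  by_cases h : s = i
  · subst h; simp [List.getD_eq_getElem?_getD, hi]
  · simp [List.getD_eq_getElem?_getD, Ne.symm h, h]

lemma sum_list_range (m : Nat) (F : Nat → Int) :
    ((List.range m).map F).sum = ∑ j ∈ Finset.range m, F j := rfl

lemma sum_pyRange {k : Int} (hk : 0 < k) (F : Int → Int) :
    ((PySem.List.pyRange 0 k 1).map F).sum = ∑ r ∈ Finset.range k.toNat, F (r : Int) := by
  rw [show k = ((k.toNat : Nat) : Int) by omega, PySem.List.pyRange_zero_natCast, List.map_map]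
  rfl

lemma scatter_spec {k : Int} (hk : 0 < k) (idx g : Int → Int) (hidx : ∀ r, 0 ≤ idx r ∧ idx r < k) :
    ∀ (rs : List Int) (w : List Int), w.length = k.toNat →
      (rs.foldl (fun new r =>
          PySem.List.pySetD new (idx r) (PySem.List.pyGetD new (idx r) 0 + g r)) w).length = k.toNat ∧
      ∀ s : Nat, s < k.toNat →
        (rs.foldl (fun new r =>
            PySem.List.pySetD new (idx r) (PySem.List.pyGetD new (idx r) 0 + g r)) w).getD s 0
          = w.getD s 0 + (rs.map (fun r => if (idx r).toNat = s then g r else 0)).sum := by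
  intro rs
  induction rs with
  | nil => intro w hlen; simp [hlen]
  | cons r rs ih =>
    intro w hlen
    obtain ⟨h0, h1⟩ := hidx r
    have hlt : (idx r).toNat < w.length := by omega
    simp only [List.foldl_cons]
    rw [PySem.List.pySetD_of_nonneg _ _ h0, PySem.List.pyGetD_eq_getElem _ _ h0 (by omega)]
    obtain ⟨hl, hp⟩ := ih (w.set (idx r).toNat (w[(idx r).toNat] + g r)) (by simp [hlen])
    refine ⟨hl, fun s hs => ?_⟩
    rw [hp s hs, getD_set_eq _ _ _ _ hlt]
    by_cases hsi : s = (idx r).toNat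
    · subst hsi
      rw [if_pos rfl, List.getD_eq_getElem _ _ hlt]
      simp only [List.map_cons, List.sum_cons, if_true]
      ring
    · rw [if_neg hsi]
      simp only [List.map_cons, List.sum_cons]
      rw [if_neg (Ne.symm hsi)]
      ring

lemma absorbFold_spec {k : Int} (hk : 0 < k) (p : Int) (vec : List Int) :
    ∀ (js : List Int) (q : Int) (w : List Int), w.length = k.toNat →
      ((js.foldl (fun (st : List Int × Int) _ =>
          ((PySem.List.pyRange 0 k 1).foldl
            (fun new r =>
              PySem.List.pySetD new (PySem.Int.mod (r * st.2) k)
                (PySem.List.pyGetD new (PySem.Int.mod (r * st.2) k) 0 + PySem.List.pyGetD vec r 0))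
            st.1,
           st.2 * p)) (w, q)).1).length = k.toNat ∧
      ∀ s : Nat, s < k.toNat →
        ((js.foldl (fun (st : List Int × Int) _ =>
            ((PySem.List.pyRange 0 k 1).foldl
              (fun new r =>
                PySem.List.pySetD new (PySem.Int.mod (r * st.2) k)
                  (PySem.List.pyGetD new (PySem.Int.mod (r * st.2) k) 0 + PySem.List.pyGetD vec r 0))
              st.1,
             st.2 * p)) (w, q)).1).getD s 0
          = w.getD s 0 + ((pvPows q p js.length).map (fun u =>
              ((PySem.List.pyRange 0 k 1).map (fun r =>
                if (PySem.Int.mod (r * u) k).toNat = s then PySem.List.pyGetD vec r 0 else 0)).sum)).sum := by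
  intro js
  induction js with
  | nil => intro q w hlen; simp [pvPows, hlen]
  | cons j js ih =>
    intro q w hlen
    simp only [List.foldl_cons, List.length_cons, pvPows]
    have hsc := scatter_spec hk (fun r => PySem.Int.mod (r * q) k) (fun r => PySem.List.pyGetD vec r 0)
      (fun r => ⟨PySem.Int.mod_nonneg _ hk, PySem.Int.mod_lt _ hk⟩) (PySem.List.pyRange 0 k 1) w hlen
    obtain ⟨hl1, hp1⟩ := hsc
    obtain ⟨hl2, hp2⟩ := ih (q * p) _ hl1
    refine ⟨hl2, fun s hs => ?_⟩
    rw [hp2 s hs, hp1 s hs]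
    simp only [List.map_cons, List.sum_cons]
    ring

lemma pvAbsorb_spec {k : Int} (hk : 0 < k) (p e : Int) (vec : List Int) (_hlen : vec.length = k.toNat) :
    (pvAbsorb k p e vec).length = k.toNat ∧
    ∀ s : Nat, s < k.toNat →
      (pvAbsorb k p e vec).getD s 0
        = ((pvPows 1 p (PySem.List.pyRange 0 (e + 1) 1).length).map (fun u =>
            ((PySem.List.pyRange 0 k 1).map (fun r =>
              if (PySem.Int.mod (r * u) k).toNat = s then PySem.List.pyGetD vec r 0 else 0)).sum)).sum := by
  have h := absorbFold_spec hk p vec (PySem.List.pyRange 0 (e + 1) 1) 1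
    (PySem.List.pyRepeat [(0:Int)] k) (by simp [PySem.List.pyRepeat_singleton])
  obtain ⟨hl, hp⟩ := h
  refine ⟨hl, fun s hs => ?_⟩
  have h2 := hp s hs
  simpa [pvAbsorb, PySem.List.pyRepeat_singleton] using h2


lemma foldRec_spec {k : Int} (_hk : 0 < k) (p : Int) (rest : List (Int × Int))
    (hrest : ∀ (cur : Int) (counts : List Int), counts.length = k.toNat →
      (pvRecA k rest cur counts).length = k.toNat ∧
      ∀ s : Nat, s < k.toNat →
        (pvRecA k rest cur counts).getD s 0 = counts.getD s 0 + pvCnt k rest cur s) :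
    ∀ (js : List Int) (v : Int) (counts : List Int), counts.length = k.toNat →
      ((js.foldl (fun (st : Int × List Int) _ => (st.1 * p, pvRecA k rest st.1 st.2)) (v, counts)).2).length = k.toNat ∧
      ∀ s : Nat, s < k.toNat →
        ((js.foldl (fun (st : Int × List Int) _ => (st.1 * p, pvRecA k rest st.1 st.2)) (v, counts)).2).getD s 0
          = counts.getD s 0 + ((pvPows v p js.length).map (fun w => pvCnt k rest w s)).sum := by
  intro js
  induction js with
  | nil => intro v counts hlen; simp [pvPows, hlen]
  | cons j js ih =>
    intro v counts hlen
    simp only [List.foldl_cons, List.length_cons, pvPows]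
    obtain ⟨hl1, hp1⟩ := hrest v counts hlen
    obtain ⟨hl2, hp2⟩ := ih (v * p) _ hl1
    refine ⟨hl2, fun s hs => ?_⟩
    rw [hp2 s hs, hp1 s hs]
    simp only [List.map_cons, List.sum_cons]
    ring

-- A side: pointwise description of pvRecA
lemma pvRecA_spec {k : Int} (hk : 0 < k) :
    ∀ (L : List (Int × Int)) (cur : Int) (counts : List Int), counts.length = k.toNat →
      (pvRecA k L cur counts).length = k.toNat ∧
      ∀ s : Nat, s < k.toNat →
        (pvRecA k L cur counts).getD s 0 = counts.getD s 0 + pvCnt k L cur s := by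
  intro L
  induction L with
  | nil =>
    intro cur counts hlen
    have h0 : (0:Int) ≤ PySem.Int.mod cur k := PySem.Int.mod_nonneg cur hk
    have h1 : PySem.Int.mod cur k < k := PySem.Int.mod_lt cur hk
    have hlt : (PySem.Int.mod cur k).toNat < counts.length := by omega
    simp only [pvRecA]
    rw [PySem.List.pySetD_of_nonneg _ _ h0, PySem.List.pyGetD_eq_getElem _ _ h0 (by omega)]
    refine ⟨by simp [hlen], fun s hs => ?_⟩
    rw [getD_set_eq _ _ _ _ hlt]
    simp only [pvCnt]
    by_cases hsi : s = (PySem.Int.mod cur k).toNat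
    · subst hsi
      rw [if_pos rfl, if_pos (by omega), List.getD_eq_getElem _ _ hlt]
    · rw [if_neg hsi, if_neg (by omega)]
      ring
  | cons pe rest ih =>
    obtain ⟨p, e⟩ := pe
    intro cur counts hlen
    simp only [pvRecA]
    obtain ⟨hl, hp⟩ := foldRec_spec hk p rest ih (PySem.List.pyRange 0 (e + 1) 1) cur counts hlen
    exact ⟨hl, fun s hs => by rw [hp s hs]; simp only [pvCnt]⟩


lemma collapse_sum (K idx : Nat) (hidx : idx < K) (a : Int) (g : Nat → Int) :
    ∑ r' ∈ Finset.range K, (if idx = r' then a else 0) * g r' = a * g idx := by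
  rw [Finset.sum_congr rfl (fun r' _ => by rw [ite_mul, zero_mul])]
  simp [Finset.sum_ite_eq, Finset.mem_range.mpr hidx]

-- B side: pointwise description of pvAbsorbList
lemma pvAbsorbList_spec {k : Int} (hk : 0 < k) :
    ∀ (L : List (Int × Int)) (vec : List Int), vec.length = k.toNat →
      (pvAbsorbList k L vec).length = k.toNat ∧
      ∀ s : Nat, s < k.toNat →
        (pvAbsorbList k L vec).getD s 0 =
          ∑ r ∈ Finset.range k.toNat, vec.getD r 0 * pvCnt k L (r : Int) s := by
  intro L
  induction L with
  | nil =>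
    intro vec hlen
    refine ⟨by simpa [pvAbsorbList] using hlen, fun s hs => ?_⟩
    simp only [pvAbsorbList, List.foldl_nil, pvCnt]
    have hcg : ∀ r ∈ Finset.range k.toNat,
        vec.getD r 0 * (if PySem.Int.mod (r:Int) k = (s:Int) then 1 else 0)
          = if (r:Nat) = s then vec.getD r 0 else 0 := by
      intro r hr
      have hr' := Finset.mem_range.mp hr
      rw [PySem.Int.mod_eq_emod_of_pos hk, Int.emod_eq_of_lt (by omega) (by omega)]
      by_cases h : r = s
      · subst h; simp
      · rw [if_neg (by exact_mod_cast h), if_neg h, mul_zero]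
    rw [Finset.sum_congr rfl hcg, Finset.sum_ite_eq' (Finset.range k.toNat) s (fun r => vec.getD r 0)]
    simp [Finset.mem_range.mpr hs]
  | cons pe L ih =>
    obtain ⟨p, e⟩ := pe
    intro vec hlen
    obtain ⟨hal, hap⟩ := pvAbsorb_spec hk p e vec hlen
    obtain ⟨hl, hp⟩ := ih (pvAbsorb k p e vec) hal
    have hcons : pvAbsorbList k ((p, e) :: L) vec = pvAbsorbList k L (pvAbsorb k p e vec) := by
      simp [pvAbsorbList]
    refine ⟨by rw [hcons]; exact hl, fun s hs => ?_⟩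
    rw [hcons, hp s hs]
    have step1 : ∀ r' ∈ Finset.range k.toNat,
        (pvAbsorb k p e vec).getD r' 0 * pvCnt k L (r':Int) s =
        (∑ j ∈ Finset.range (PySem.List.pyRange 0 (e + 1) 1).length,
          ∑ r ∈ Finset.range k.toNat,
            (if (PySem.Int.mod ((r:Int) * (1 * p ^ j)) k).toNat = r' then vec.getD r 0 else 0))
          * pvCnt k L (r':Int) s := by
      intro r' hr'
      rw [hap r' (Finset.mem_range.mp hr')]
      congr 1
      rw [pvPows_eq, List.map_map, sum_list_range]
      refine Finset.sum_congr rfl (fun j _ => ?_)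
      simp only [Function.comp]
      rw [sum_pyRange hk]
      refine Finset.sum_congr rfl (fun r _ => ?_)
      rw [PySem.List.pyGetD_natCast]
    rw [Finset.sum_congr rfl step1]
    simp only [Finset.sum_mul]
    rw [Finset.sum_comm]
    have step2 : ∀ j ∈ Finset.range (PySem.List.pyRange 0 (e + 1) 1).length,
        ∑ r' ∈ Finset.range k.toNat, ∑ r ∈ Finset.range k.toNat,
            (if (PySem.Int.mod ((r:Int) * (1 * p ^ j)) k).toNat = r' then vec.getD r 0 else 0)
              * pvCnt k L (r':Int) s
          = ∑ r ∈ Finset.range k.toNat, vec.getD r 0 * pvCnt k L ((r:Int) * (1 * p ^ j)) s := by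
      intro j _
      rw [Finset.sum_comm]
      refine Finset.sum_congr rfl (fun r _ => ?_)
      have h0 : (0:Int) ≤ PySem.Int.mod ((r:Int) * (1 * p ^ j)) k := PySem.Int.mod_nonneg _ hk
      have h1 : PySem.Int.mod ((r:Int) * (1 * p ^ j)) k < k := PySem.Int.mod_lt _ hk
      rw [collapse_sum k.toNat (PySem.Int.mod ((r:Int) * (1 * p ^ j)) k).toNat (by omega)
        (vec.getD r 0) (fun r' => pvCnt k L (r':Int) s)]
      congr 1
      apply pvCnt_congr hk
      rw [show (((PySem.Int.mod ((r:Int) * (1 * p ^ j)) k).toNat : Int)) = PySem.Int.mod ((r:Int) * (1 * p ^ j)) k by omega,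
        PySem.Int.mod_eq_emod_of_pos hk]
      exact Int.emod_emod_of_dvd _ dvd_rfl
    rw [Finset.sum_congr rfl step2, Finset.sum_comm]
    refine Finset.sum_congr rfl (fun r _ => ?_)
    simp only [pvCnt, pvPows_eq, List.map_map, sum_list_range, Finset.mul_sum]
    refine Finset.sum_congr rfl (fun j _ => ?_)
    simp [Function.comp]

-- simulation: B's fused main loop = A's loop followed by absorbing A's factor list
lemma pvFacLoopA_acc : ∀ (fuel : Nat) (m f step : Int) (fac : List (Int × Int)),
    pvFacLoopA fuel m f step fac =
      ((pvFacLoopA fuel m f step []).1, fac ++ (pvFacLoopA fuel m f step []).2) := by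
  intro fuel
  induction fuel with
  | zero => intro m f step fac; simp [pvFacLoopA]
  | succ fuel ih =>
    intro m f step fac
    simp only [pvFacLoopA]
    split
    · rw [ih _ _ _ (if (pvStrip f (m.natAbs + 1) m).2 ≠ 0 then
          fac ++ [(f, (pvStrip f (m.natAbs + 1) m).2)] else fac),
        ih _ _ _ (if (pvStrip f (m.natAbs + 1) m).2 ≠ 0 then
          ([] : List (Int × Int)) ++ [(f, (pvStrip f (m.natAbs + 1) m).2)] else [])]
      by_cases hc : (pvStrip f (m.natAbs + 1) m).2 ≠ 0 <;> simp [hc]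
    · simp

lemma pvLoopB_sim (k : Int) : ∀ (fuel : Nat) (m f step : Int) (vec : List Int),
    ((step = 2 ∧ f % 3 = 2) ∨ (step = 4 ∧ f % 3 = 1)) →
    pvLoopB k fuel m f vec =
      ((pvFacLoopA fuel m f step []).1, pvAbsorbList k (pvFacLoopA fuel m f step []).2 vec) := by
  intro fuel
  induction fuel with
  | zero => intro m f step vec _; simp [pvLoopB, pvFacLoopA, pvAbsorbList]
  | succ fuel ih =>
    intro m f step vec h
    have h3 : (0:Int) < 3 := by norm_num
    rcases h with ⟨hs, hf⟩ | ⟨hs, hf⟩ <;> subst hs <;>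
      simp only [pvLoopB, pvFacLoopA, PySem.Int.mod_eq_emod_of_pos h3, hf] <;> split
    · rw [if_pos (show ((2:Int) == 2) = true from rfl), show (6:Int) - 2 = 4 by norm_num,
        pvFacLoopA_acc fuel (pvStrip f (m.natAbs + 1) m).1 (f + 2) 4,
        ih (pvStrip f (m.natAbs + 1) m).1 (f + 2) 4 _ (Or.inr ⟨rfl, by omega⟩)]
      by_cases hcz : (pvStrip f (m.natAbs + 1) m).2 ≠ 0 <;>
        simp [hcz, pvAbsorbList]
    · simp [pvAbsorbList]
    · rw [if_neg (show ¬ ((1:Int) == 2) = true by decide), show (6:Int) - 4 = 2 by norm_num,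
        pvFacLoopA_acc fuel (pvStrip f (m.natAbs + 1) m).1 (f + 4) 2,
        ih (pvStrip f (m.natAbs + 1) m).1 (f + 4) 2 _ (Or.inl ⟨rfl, by omega⟩)]
      by_cases hcz : (pvStrip f (m.natAbs + 1) m).2 ≠ 0 <;>
        simp [hcz, pvAbsorbList]
    · simp [pvAbsorbList]

lemma alt_eq_absorbList (n k : Int) :
    divisor_residue_counts_alt n k =
      pvAbsorbList k (pvFactorizeA n)
        (PySem.List.pySetD (PySem.List.pyRepeat [(0:Int)] k) (PySem.Int.mod 1 k) 1) := by
  simp only [divisor_residue_counts_alt, pvFactorizeA]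
  rw [pvLoopB_sim k _ _ 5 2 _ (Or.inl ⟨rfl, by decide⟩)]
  set s2 := pvStrip 2 (n.natAbs + 1) n with hs2
  set s3 := pvStrip 3 (s2.1.natAbs + 1) s2.1 with hs3
  rw [pvFacLoopA_acc (s3.1.natAbs + 1) s3.1 5 2
    (if s3.2 ≠ 0 then (if s2.2 ≠ 0 then [((2:Int), s2.2)] else []) ++ [((3:Int), s3.2)]
     else if s2.2 ≠ 0 then [((2:Int), s2.2)] else [])]
  by_cases hc2 : s2.2 ≠ 0 <;> by_cases hc3 : s3.2 ≠ 0 <;>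
    by_cases h1 : 1 < (pvFacLoopA (s3.1.natAbs + 1) s3.1 5 2 []).1 <;>
      simp [hc2, hc3, h1, pvAbsorbList, List.foldl_append]

-- ===== VERDICT (by name: the statement is the Claim_ definition above) =====
theorem divisor_residue_counts_spec : Claim_equal_divisor_residue_counts := by
  intro n k _hdom hpre
  obtain ⟨_hn, hk1⟩ := hpre
  have hk : (0:Int) < k := by omega
  unfold Spec_divisor_residue_counts
  rw [alt_eq_absorbList]
  have h0 : (0:Int) ≤ PySem.Int.mod 1 k := PySem.Int.mod_nonneg _ hk
  have h1 : PySem.Int.mod 1 k < k := PySem.Int.mod_lt _ hk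
  have hlen0 : (PySem.List.pyRepeat [(0:Int)] k).length = k.toNat := by
    simp [PySem.List.pyRepeat_singleton]
  obtain ⟨hAl, hAp⟩ := (pvRecA_spec hk) (pvFactorizeA n) 1 _ hlen0
  have hlenv : (PySem.List.pySetD (PySem.List.pyRepeat [(0:Int)] k) (PySem.Int.mod 1 k) 1).length
      = k.toNat := by
    rw [PySem.List.pySetD_of_nonneg _ _ h0]
    simp [PySem.List.pyRepeat_singleton]
  obtain ⟨hBl, hBp⟩ := (pvAbsorbList_spec hk) (pvFactorizeA n) _ hlenv
  unfold divisor_residue_counts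
  apply List.ext_getElem (by rw [hAl, hBl])
  intro i hi1 hi2
  have hiK : i < k.toNat := by rw [hAl] at hi1; exact hi1
  rw [← List.getD_eq_getElem _ 0 hi1, ← List.getD_eq_getElem _ 0 hi2, hAp i hiK, hBp i hiK]
  have hidx : (PySem.Int.mod 1 k).toNat < k.toNat := by omega
  have hvec0 : ∀ r : Nat, r < k.toNat →
      (PySem.List.pySetD (PySem.List.pyRepeat [(0:Int)] k) (PySem.Int.mod 1 k) 1).getD r 0
        = if r = (PySem.Int.mod 1 k).toNat then 1 else 0 := by
    intro r hr
    rw [PySem.List.pySetD_of_nonneg _ _ h0, PySem.List.pyRepeat_singleton,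
      getD_set_eq _ _ _ _ (by simp; omega)]
    by_cases h : r = (PySem.Int.mod 1 k).toNat
    · simp [h]
    · simp [h]
  rw [Finset.sum_congr rfl (fun r hr => by
    rw [hvec0 r (Finset.mem_range.mp hr), ite_mul, one_mul, zero_mul])]
  rw [Finset.sum_ite_eq' (Finset.range k.toNat) (PySem.Int.mod 1 k).toNat
    (fun r => pvCnt k (pvFactorizeA n) (r:Int) i)]
  rw [if_pos (Finset.mem_range.mpr hidx)]
  rw [pvCnt_congr hk (pvFactorizeA n) ((PySem.Int.mod 1 k).toNat : Int) 1 i (by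
    rw [show (((PySem.Int.mod 1 k).toNat : Int)) = PySem.Int.mod 1 k by omega,
      PySem.Int.mod_eq_emod_of_pos hk]
    exact Int.emod_emod_of_dvd _ dvd_rfl)]
  rw [PySem.List.pyRepeat_singleton]
  simp
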